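-- pv_equiv track=rewrite | github.com/rayyan-khan/1-slider-puzzle | 1 3x3 solve 100/printSliders.py | puzzFormatter
-- ===== SOURCE A (Python) =====
-- def puzzFormatter(s):
--     top = []
--     mid = []
--     bot = []
--     matr = [top,mid,bot]
--     for i in range(0, len(s)):
--         if i < 3:
--             top.append(s[i])
--         elif i < 6:
--             mid.append(s[i])
--         else:
--             bot.append(s[i])
--     return matr
-- ===== SOURCE B (Python) =====
-- def puzzFormatter(s):
--     return [list(s[0:3]), list(s[3:6]), list(s[6:])]
-- ===== Notes on version B (the rewrite author's own statement) =====
-- stated objective: simpler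
-- what changed: Replaces the per-index loop with if/elif dispatch into three accumulators by three direct slices s[0:3], s[3:6], s[6:] done in bulk.
import Mathlib
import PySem

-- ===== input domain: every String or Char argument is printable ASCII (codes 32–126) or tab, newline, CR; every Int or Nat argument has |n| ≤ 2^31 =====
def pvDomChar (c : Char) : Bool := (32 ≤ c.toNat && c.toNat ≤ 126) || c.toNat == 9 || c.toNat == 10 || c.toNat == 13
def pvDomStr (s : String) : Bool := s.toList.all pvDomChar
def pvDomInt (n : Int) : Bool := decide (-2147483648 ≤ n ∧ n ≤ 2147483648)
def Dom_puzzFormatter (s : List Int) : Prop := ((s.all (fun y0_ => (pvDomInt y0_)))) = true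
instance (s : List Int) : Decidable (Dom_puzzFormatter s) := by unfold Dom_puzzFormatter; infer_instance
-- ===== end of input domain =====

-- B replaces A's per-index loop (if/elif dispatch into three accumulators) by three direct slices; simpler, same cost.

-- ===== PORT A =====
-- the loop body: append s[i] (always in range, so pyGetD's default is never used) to top/mid/bot by the same if/elif/else
def puzzFormatter (s : List Int) : List (List Int) :=
  let st := (PySem.List.pyRange 0 s.length 1).foldl
    (fun (st : List Int × List Int × List Int) i =>
      let v := PySem.List.pyGetD s i 0
      if i < 3 then (st.1 ++ [v], st.2.1, st.2.2)
      else if i < 6 then (st.1, st.2.1 ++ [v], st.2.2)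
      else (st.1, st.2.1, st.2.2 ++ [v]))
    ([], [], [])
  [st.1, st.2.1, st.2.2]

-- ===== PORT B =====
def puzzFormatter_alt (s : List Int) : List (List Int) :=
  [PySem.List.slice s (some 0) (some 3),
   PySem.List.slice s (some 3) (some 6),
   PySem.List.slice s (some 6) none]

-- ===== PRECONDITION & SPEC =====
def Spec_puzzFormatter (s : List Int) (out : List (List Int)) : Prop := out = puzzFormatter_alt s
instance (s : List Int) (out : List (List Int)) : Decidable (Spec_puzzFormatter s out) := by unfold Spec_puzzFormatter; infer_instance

-- ===== CLAIM (what is proved, stated in full; the proofs are below) =====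
def Claim_equal_puzzFormatter : Prop := ∀ (s : List Int), Dom_puzzFormatter s → Spec_puzzFormatter s (puzzFormatter s)

-- ===== LEMMAS AND PROOFS =====

-- loop invariant: after the first k iterations the three accumulators are the three sections of s.take k
theorem puzzFormatter_loop (s : List Int) (k : Nat) (hk : k ≤ s.length) :
    (PySem.List.pyRange 0 (k : Int) 1).foldl
      (fun (st : List Int × List Int × List Int) i =>
        let v := PySem.List.pyGetD s i 0
        if i < 3 then (st.1 ++ [v], st.2.1, st.2.2)
        else if i < 6 then (st.1, st.2.1 ++ [v], st.2.2)
        else (st.1, st.2.1, st.2.2 ++ [v]))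
      ([], [], [])
    = ((s.take k).take 3, ((s.take k).drop 3).take 3, (s.take k).drop 6) := by
  induction k with
  | zero => simp [PySem.List.pyRange_one_eq_nil]
  | succ k ih =>
    have hk' : k ≤ s.length := Nat.le_of_succ_le hk
    have hklt : k < s.length := hk
    have hcast : ((k : Int) + 1) = ((k + 1 : Nat) : Int) := by push_cast; ring
    rw [← hcast, PySem.List.pyRange_one_succ_right (by exact_mod_cast Nat.zero_le k),
        List.foldl_append, ih hk']
    simp only [List.foldl_cons, List.foldl_nil]
    have hv : PySem.List.pyGetD s (k : Int) 0 = s[k] := PySem.List.pyGetD_ofNat s k 0 hklt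
    have htake : s.take (k + 1) = s.take k ++ [s[k]] := by
      rw [List.take_add_one]; simp [List.getElem?_eq_getElem hklt]
    have hlen : (s.take k).length = k := List.length_take_of_le hk'
    rw [htake]
    have hl1 : (List.take k s ++ [s[k]]).length = k + 1 := by simp; omega
    by_cases h3 : (k : Int) < 3
    · have hk3 : k < 3 := by exact_mod_cast h3
      rw [if_pos h3, hv]
      have A1 : List.take 3 (List.take k s ++ [s[k]]) = List.take 3 (List.take k s) ++ [s[k]] := by
        have e1 : List.take 3 (List.take k s ++ [s[k]]) = List.take k s ++ [s[k]] :=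
          List.take_of_length_le (by omega)
        have e2 : List.take 3 (List.take k s) = List.take k s :=
          List.take_of_length_le (by omega)
        rw [e1, e2]
      have A2 : List.drop 3 (List.take k s ++ [s[k]]) = ([] : List Int) :=
        List.drop_eq_nil_of_le (by omega)
      have A2' : List.drop 3 (List.take k s) = ([] : List Int) :=
        List.drop_eq_nil_of_le (by omega)
      have A3 : List.drop 6 (List.take k s ++ [s[k]]) = ([] : List Int) :=
        List.drop_eq_nil_of_le (by omega)
      have A3' : List.drop 6 (List.take k s) = ([] : List Int) :=
        List.drop_eq_nil_of_le (by omega)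
      rw [A1, A2, A2', A3, A3']
    · by_cases h6 : (k : Int) < 6
      · have hk3 : 3 ≤ k := by
          by_contra hc
          exact h3 (by exact_mod_cast Nat.lt_of_not_le hc)
        have hk6 : k < 6 := by exact_mod_cast h6
        rw [if_neg h3, if_pos h6, hv]
        have hdl : (List.drop 3 (List.take k s)).length = k - 3 := by simp; omega
        have A1 : List.take 3 (List.take k s ++ [s[k]]) = List.take 3 (List.take k s) :=
          List.take_append_of_le_length (by omega)
        have A2 : List.drop 3 (List.take k s ++ [s[k]]) = List.drop 3 (List.take k s) ++ [s[k]] :=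
          List.drop_append_of_le_length (by omega)
        have A2' : List.take 3 (List.drop 3 (List.take k s) ++ [s[k]]) =
            List.take 3 (List.drop 3 (List.take k s)) ++ [s[k]] := by
          have e1 : List.take 3 (List.drop 3 (List.take k s) ++ [s[k]]) =
              List.drop 3 (List.take k s) ++ [s[k]] :=
            List.take_of_length_le (by
              simp only [List.length_append, hdl, List.length_cons, List.length_nil]; omega)
          have e2 : List.take 3 (List.drop 3 (List.take k s)) = List.drop 3 (List.take k s) :=
            List.take_of_length_le (by omega)
          rw [e1, e2]
        have A3 : List.drop 6 (List.take k s ++ [s[k]]) = ([] : List Int) :=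
          List.drop_eq_nil_of_le (by omega)
        have A3' : List.drop 6 (List.take k s) = ([] : List Int) :=
          List.drop_eq_nil_of_le (by omega)
        rw [A1, A2, A2', A3, A3']
      · have hk6 : 6 ≤ k := by
          by_contra hc
          exact h6 (by exact_mod_cast Nat.lt_of_not_le hc)
        rw [if_neg h3, if_neg h6, hv]
        have hdl : (List.drop 3 (List.take k s)).length = k - 3 := by simp; omega
        have A1 : List.take 3 (List.take k s ++ [s[k]]) = List.take 3 (List.take k s) :=
          List.take_append_of_le_length (by omega)
        have A2 : List.drop 3 (List.take k s ++ [s[k]]) = List.drop 3 (List.take k s) ++ [s[k]] :=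
          List.drop_append_of_le_length (by omega)
        have A2' : List.take 3 (List.drop 3 (List.take k s) ++ [s[k]]) =
            List.take 3 (List.drop 3 (List.take k s)) :=
          List.take_append_of_le_length (by omega)
        have A3 : List.drop 6 (List.take k s ++ [s[k]]) = List.drop 6 (List.take k s) ++ [s[k]] :=
          List.drop_append_of_le_length (by omega)
        rw [A1, A2, A2', A3]

-- ===== VERDICT (by name: the statement is the Claim_ definition above) =====
theorem puzzFormatter_spec : Claim_equal_puzzFormatter := by
  intro s _
  unfold Spec_puzzFormatter puzzFormatter puzzFormatter_alt
  rw [puzzFormatter_loop s s.length le_rfl]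
  simp [PySem.List.slice_zero_start]
  constructor
  · have := PySem.List.slice_to_natCast (xs := s) (b := 3)
    simpa using this.symm
  constructor
  · have := PySem.List.slice_natCast (xs := s) (a := 3) (b := 6)
    simpa using this.symm
  · have := PySem.List.slice_from_natCast (xs := s) (a := 6)
    simpa using this.symm
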